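-- pv_equiv track=rewrite | github.com/tobbre/ra2223 | src/ILPApproach/MILPdimensions2.py | pattern_finder
-- ===== SOURCE A (Python) =====
-- def pattern_finder(dimension, max_number):
-- 	output = []
-- 	pat = [0] * dimension
-- 	output.append(tuple(pat.copy()))
-- 	while (pat[0] < max_number):
-- 		pointer = dimension - 1
-- 		while sum(pat) == max_number:
-- 			pat[pointer] = 0
-- 			pointer -= 1
-- 		pat[pointer] += 1
-- 		output.append(tuple(pat.copy()))
-- 	return output
-- ===== SOURCE B (Python) =====
-- def pattern_finder(dimension, max_number):
--     budget = max(max_number, 0)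
--     # breadth-wise layers of shared prefix chains: node = (parent, value, remaining)
--     layer = [(None, None, budget)]
--     for _ in range(dimension):
--         layer = [(node, v, node[2] - v) for node in layer for v in range(node[2] + 1)]
--     out = []
--     for node in layer:
--         t = []
--         while node[1] is not None:
--             t.append(node[1])
--             node = node[0]
--         t.reverse()
--         out.append(tuple(t))
--     return out
-- ===== Notes on version B (the rewrite author's own statement) =====
-- stated objective: alternative
-- what changed: A mutates one pattern in place, repeatedly stepping it to its lexicographic successor with a nested zeroing loop and re-summing the whole pattern every step; B builds the result breadth-wise, one dimension per pass, extending shared prefix chains (parent-pointer nodes) by every value the carried remaining budget allows and materialising the tuples at the end.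
import Mathlib
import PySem

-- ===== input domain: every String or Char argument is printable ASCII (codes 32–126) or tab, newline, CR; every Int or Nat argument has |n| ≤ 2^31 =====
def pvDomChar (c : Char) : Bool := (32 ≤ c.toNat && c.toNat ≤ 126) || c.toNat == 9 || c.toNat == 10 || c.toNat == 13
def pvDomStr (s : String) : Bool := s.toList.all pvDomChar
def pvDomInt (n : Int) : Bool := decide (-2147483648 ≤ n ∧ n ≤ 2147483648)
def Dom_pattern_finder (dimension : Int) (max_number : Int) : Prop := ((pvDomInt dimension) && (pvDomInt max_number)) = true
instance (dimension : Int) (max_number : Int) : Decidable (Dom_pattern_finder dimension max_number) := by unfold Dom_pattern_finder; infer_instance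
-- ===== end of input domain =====

-- B replaces A's in-place odometer (repeatedly stepping one mutable pattern to its
-- lexicographic successor) by a breadth-wise layer construction: starting from the empty
-- prefix with the full budget, each pass over the dimensions extends every shared prefix
-- chain by all admissible next values, carrying the remaining budget instead of recomputing
-- sums, and materialises the tuples at the end. Objective: alternative (structurally
-- different; avoids A's per-step rescan of the whole pattern).

-- ===== PORT A =====
-- inner 'while sum(pat) == max_number' loop; state (pat, pointer); fuel guard only
-- (under Pre_ the loop provably stops within 'dimension' checks, see ILemma below).
def pvInnerA (M : Int) : List Int → Int → Nat → (List Int × Int)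
  | pat, ptr, 0 => (pat, ptr)
  | pat, ptr, fuel + 1 =>
    if pat.sum = M then pvInnerA M (pat.set ptr.toNat 0) (ptr - 1) fuel
    else (pat, ptr)

-- outer 'while pat[0] < max_number' loop; fuel guard only ((M+1)^d is enough, proved below).
def pvOuterA (M : Int) (d : Nat) : List Int → List (List Int) → Nat → List (List Int)
  | _, out, 0 => out
  | pat, out, fuel + 1 =>
    if pat.getD 0 0 < M then
      let r := pvInnerA M pat ((d : Int) - 1) d
      let pat' := r.1.set r.2.toNat (r.1.getD r.2.toNat 0 + 1)
      pvOuterA M d pat' (out ++ [pat']) fuel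
    else out

def pattern_finder (dimension : Int) (max_number : Int) : List (List Int) :=
  let d := dimension.toNat
  let pat := List.replicate d (0 : Int)
  pvOuterA max_number d pat [pat] ((max_number.toNat + 1) ^ d)

-- ===== PORT B =====
-- Python B's parent-pointer chain (node, v, rem) is exactly a shared cons-list of the
-- values read leaf-to-root, paired with the remaining budget: (v :: parentChain, rem);
-- the final walk-and-reverse materialisation is List.reverse.
def pattern_finder_alt (dimension : Int) (max_number : Int) : List (List Int) :=
  let budget := max max_number 0
  let layer := (List.range dimension.toNat).foldl
    (fun lyr _ => lyr.flatMap
      (fun node => (PySem.List.pyRange 0 (node.2 + 1) 1).map (fun v => (v :: node.1, node.2 - v))))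
    [(([] : List Int), budget)]
  layer.map (fun node => node.1.reverse)

-- ===== PRECONDITION & SPEC =====
-- Pre_ excludes exactly dimension ≤ 0, where Python A raises IndexError (pat[0] on an empty pat).
def Pre_pattern_finder (dimension : Int) (max_number : Int) : Prop := 1 ≤ dimension
instance (dimension : Int) (max_number : Int) : Decidable (Pre_pattern_finder dimension max_number) := by unfold Pre_pattern_finder; infer_instance
def pvWitness_pattern_finder : Int × Int := (2, 2)

def Spec_pattern_finder (dimension : Int) (max_number : Int) (out : List (List Int)) : Prop := out = pattern_finder_alt dimension max_number
instance (dimension : Int) (max_number : Int) (out : List (List Int)) : Decidable (Spec_pattern_finder dimension max_number out) := by unfold Spec_pattern_finder; infer_instance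

-- ===== CLAIM (what is proved, stated in full; the proofs are below) =====
def Claim_equal_pattern_finder : Prop := ∀ (dimension : Int) (max_number : Int), Dom_pattern_finder dimension max_number → Pre_pattern_finder dimension max_number → Spec_pattern_finder dimension max_number (pattern_finder dimension max_number)

-- ===== LEMMAS AND PROOFS =====

-- all length-k lists of nonnegative ints with sum ≤ b, in lexicographic order (front-first)
def pvGen : Nat → Int → List (List Int)
  | 0, _ => [[]]
  | k + 1, b => (PySem.List.pyRange 0 (b + 1) 1).flatMap (fun v => (pvGen k (b - v)).map (v :: ·))

-- lexicographic successor within the sum-≤-b universe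
def pvSucc (b : Int) : List Int → List Int
  | [] => []
  | [p] => [p + 1]
  | p :: q :: rest =>
    if q = b - p then (p + 1) :: List.replicate (rest.length + 1) 0
    else p :: pvSucc (b - p) (q :: rest)

-- the part of pvGen strictly after pat
def pvAfter : List Int → Int → List (List Int)
  | [], _ => []
  | p :: rest, b =>
    (pvAfter rest (b - p)).map (p :: ·) ++
      (PySem.List.pyRange (p + 1) (b + 1) 1).flatMap (fun v => (pvGen rest.length (b - v)).map (v :: ·))

def pvValid (b : Int) (pat : List Int) : Prop := (∀ x ∈ pat, 0 ≤ x) ∧ pat.sum ≤ b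

theorem pv_sum_nonneg {l : List Int} (h : ∀ x ∈ l, 0 ≤ x) : 0 ≤ l.sum := by
  induction l with
  | nil => simp
  | cons a t ih =>
    simp only [List.sum_cons]
    have := h a (by simp)
    have := ih (fun x hx => h x (by simp [hx]))
    omega

theorem pv_zeros_of_sum_le {l : List Int} (h : ∀ x ∈ l, 0 ≤ x) (hs : l.sum ≤ 0) :
    l = List.replicate l.length 0 := by
  induction l with
  | nil => simp
  | cons a t ih =>
    have ha := h a (by simp)
    have ht : 0 ≤ t.sum := pv_sum_nonneg (fun x hx => h x (by simp [hx]))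
    simp only [List.sum_cons] at hs
    have ha0 : a = 0 := by omega
    have := ih (fun x hx => h x (by simp [hx])) (by omega)
    simp [ha0, List.replicate_succ, ← this]

theorem pvAfter_zeros_zero : ∀ k, pvAfter (List.replicate k 0) 0 = [] := by
  intro k
  induction k with
  | zero => simp [pvAfter]
  | succ n ih =>
    rw [List.replicate_succ, pvAfter, PySem.List.pyRange_one_eq_nil (le_refl ((0:Int) + 1))]
    simp [ih]

theorem pvGen_cons_zero : ∀ k b, 0 ≤ b →
    pvGen k b = List.replicate k 0 :: pvAfter (List.replicate k 0) b := by
  intro k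
  induction k with
  | zero => intro b hb; simp [pvGen, pvAfter]
  | succ n ih =>
    intro b hb
    rw [pvGen, PySem.List.pyRange_one_cons (by omega : (0:Int) < b + 1)]
    simp only [List.flatMap_cons, sub_zero, zero_add]
    rw [ih b hb]
    simp [List.replicate_succ, pvAfter, sub_zero]

theorem pvAfter_of_max (b : Int) (rest : List Int) (h : ∀ x ∈ rest, 0 ≤ x) (hs : rest.sum ≤ 0) :
    pvAfter (b :: rest) b = [] := by
  rw [pvAfter]
  have h1 : pvAfter rest (b - b) = [] := by
    have := pv_zeros_of_sum_le h hs
    rw [this, sub_self, pvAfter_zeros_zero]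
  rw [h1, PySem.List.pyRange_one_eq_nil (by omega : b + 1 ≤ b + 1)]
  simp

theorem pvSucc_length : ∀ (b : Int) (pat : List Int), (pvSucc b pat).length = pat.length := by
  intro b pat
  induction pat generalizing b with
  | nil => simp [pvSucc]
  | cons p rest ih =>
    cases rest with
    | nil => simp [pvSucc]
    | cons q r' =>
      rw [pvSucc]
      split
      · simp
      · simpa using ih (b - p)

theorem pvSucc_valid : ∀ (pat : List Int) (b : Int), pat ≠ [] → pvValid b pat →
    pat.getD 0 0 < b → pvValid b (pvSucc b pat) := by
  intro pat
  induction pat with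
  | nil => intro b h; exact absurd rfl h
  | cons p rest ih =>
    intro b _ hv hlt
    obtain ⟨hnn, hsum⟩ := hv
    simp only [List.getD_cons_zero] at hlt
    have hp : 0 ≤ p := hnn p (by simp)
    cases rest with
    | nil =>
      refine ⟨fun x hx => ?_, ?_⟩ <;> simp [pvSucc] at *
      · omega
      · omega
    | cons q r' =>
      have hrs : 0 ≤ r'.sum := pv_sum_nonneg (fun x hx => hnn x (by simp [hx]))
      have hq : 0 ≤ q := hnn q (by simp)
      simp only [List.sum_cons] at hsum
      rw [pvSucc]
      split
      · refine ⟨fun x hx => ?_, ?_⟩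
        · rcases List.mem_cons.mp hx with h | h
          · omega
          · rw [List.eq_of_mem_replicate h]
        · simp [List.sum_replicate]
          omega
      · rename_i hne
        have hqlt : q < b - p := by omega
        have ih' := ih (b - p) (by simp) ⟨fun x hx => hnn x (by simp [hx]), by simp; omega⟩
          (by simpa using hqlt)
        obtain ⟨inn, isum⟩ := ih'
        refine ⟨fun x hx => ?_, ?_⟩
        · rcases List.mem_cons.mp hx with h | h
          · omega
          · exact inn x h
        · simp only [List.sum_cons]
          omega

-- successor lemma: pvAfter pat b = succ :: pvAfter succ b
theorem pvSucc_after : ∀ (pat : List Int) (b : Int), pat ≠ [] → pvValid b pat →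
    pat.getD 0 0 < b →
    pvAfter pat b = pvSucc b pat :: pvAfter (pvSucc b pat) b := by
  intro pat
  induction pat with
  | nil => intro b h; exact absurd rfl h
  | cons p rest ih =>
    intro b _ hv hlt
    obtain ⟨hnn, hsum⟩ := hv
    simp only [List.getD_cons_zero] at hlt
    have hp : 0 ≤ p := hnn p (by simp)
    cases rest with
    | nil =>
      rw [pvSucc, pvAfter, pvAfter]
      rw [PySem.List.pyRange_one_cons (by omega : p + 1 < b + 1)]
      have hg : ∀ x : Int, pvGen 0 x = [[]] := fun x => rfl
      simp [pvAfter, hg]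
    | cons q r' =>
      have hrs : 0 ≤ r'.sum := pv_sum_nonneg (fun x hx => hnn x (by simp [hx]))
      have hq : 0 ≤ q := hnn q (by simp)
      simp only [List.sum_cons] at hsum
      rw [pvSucc]
      split
      · rename_i hqe
        -- exhausted tail: rest = (b-p) :: zeros
        have hr0 : r'.sum ≤ 0 := by omega
        have hz : r' = List.replicate r'.length 0 :=
          pv_zeros_of_sum_le (fun x hx => hnn x (by simp [hx])) hr0
        rw [pvAfter]
        have h1 : pvAfter (q :: r') (b - p) = [] := by
          rw [hqe, hz]
          exact pvAfter_of_max (b - p) _ (by intro x hx; rw [List.eq_of_mem_replicate hx]) (by simp)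
        rw [h1]
        rw [PySem.List.pyRange_one_cons (by omega : p + 1 < b + 1)]
        simp only [List.flatMap_cons, List.map_nil, List.nil_append]
        rw [pvGen_cons_zero _ _ (by omega : (0:Int) ≤ b - (p+1))]
        rw [pvAfter]
        simp [List.replicate_succ]
      · rename_i hne
        have hqlt : q < b - p := by omega
        have ihh := ih (b - p) (by simp) ⟨fun x hx => hnn x (by simp [hx]), by simp; omega⟩
          (by simpa using hqlt)
        rw [pvAfter, ihh, pvAfter]
        simp [pvSucc_length]

-- list index/set helpers
theorem pv_set_append_len (l : List Int) (x v : Int) (t : List Int) :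
    (l ++ x :: t).set l.length v = l ++ v :: t := by
  induction l with
  | nil => rfl
  | cons a l ih => simp [ih]

theorem pv_getD_append_len (l : List Int) (x : Int) (t : List Int) (d : Int) :
    (l ++ x :: t).getD l.length d = x := by
  induction l with
  | nil => rfl
  | cons a l ih => simpa using ih

theorem pv_getD_append_after (l : List Int) (x : Int) (t : List Int) (k : Nat) (d : Int) :
    (l ++ x :: t).getD (l.length + k + 1) d = t.getD k d := by
  induction l with
  | nil => simp only [List.nil_append, List.length_nil, Nat.zero_add]; rfl
  | cons a l ih =>
    have : (a :: l).length + k + 1 = (l.length + k + 1) + 1 := by simp; omega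
    rw [this]
    simpa using ih

theorem pv_set_getD_zero (l : List Int) (n : Nat) (h : l.getD n 0 = 0) : l.set n 0 = l := by
  induction l generalizing n with
  | nil => rfl
  | cons a t ih =>
    cases n with
    | zero => simp at h; simp [h]
    | succ m => simpa using ih m (by simpa using h)

theorem pv_zeros_getD (l : List Int) (h : ∀ y ∈ l, y = 0) (k : Nat) : l.getD k 0 = 0 := by
  induction l generalizing k with
  | nil => simp
  | cons a t ih =>
    cases k with
    | zero => simpa using h a (by simp)
    | succ m => exact ih (fun y hy => h y (by simp [hy])) m

-- the inner zeroing loop, when the pointer sits k positions above the last nonzero entry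
theorem pvInner_char (front : List Int) (x b : Int) (suffix : List Int) :
    ∀ (k fuel : Nat), x ≠ 0 → (∀ y ∈ suffix, y = 0) → (front ++ x :: suffix).sum = b →
    k ≤ suffix.length → k + 2 ≤ fuel →
    pvInnerA b (front ++ x :: suffix) ((front.length : Int) + k) fuel
      = (front ++ 0 :: suffix, (front.length : Int) - 1) := by
  intro k
  induction k with
  | zero =>
    intro fuel hx hz hsum _ hfuel
    obtain ⟨f1, rfl⟩ : ∃ f1, fuel = f1 + 2 := ⟨fuel - 2, by omega⟩
    have hs0 : suffix.sum = 0 := List.sum_eq_zero hz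
    simp only [Nat.cast_zero, add_zero]
    rw [pvInnerA]
    rw [if_pos hsum]
    have h1 : ((front.length : Int)).toNat = front.length := Int.toNat_natCast _
    rw [h1, pv_set_append_len]
    have hsum' : (front ++ 0 :: suffix).sum ≠ b := by
      simp [List.sum_append, hs0] at hsum ⊢
      omega
    rw [pvInnerA, if_neg hsum']
  | succ k ih =>
    intro fuel hx hz hsum hk hfuel
    obtain ⟨f1, rfl⟩ : ∃ f1, fuel = f1 + 1 := ⟨fuel - 1, by omega⟩
    rw [pvInnerA, if_pos hsum]
    have h1 : ((front.length : Int) + (k + 1 : Nat)).toNat = front.length + k + 1 := by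
      push_cast; omega
    rw [h1]
    have h2 : (front ++ x :: suffix).getD (front.length + k + 1) 0 = 0 := by
      rw [pv_getD_append_after]
      exact pv_zeros_getD suffix hz k
    rw [pv_set_getD_zero _ _ h2]
    have h3 : (front.length : Int) + (k + 1 : Nat) - 1 = (front.length : Int) + k := by
      push_cast; omega
    rw [h3]
    exact ih f1 hx hz hsum (by omega) (by omega)

-- decompose a list with a nonzero entry as  f ++ x :: zeros,  x ≠ 0
theorem pv_decomp (l : List Int) : (∃ y ∈ l, y ≠ 0) →
    ∃ f x s, l = f ++ x :: s ∧ x ≠ 0 ∧ (∀ y ∈ s, y = 0) := by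
  induction l using List.reverseRecOn with
  | nil => rintro ⟨y, hy, _⟩; simp at hy
  | append_singleton l' a ih =>
    rintro ⟨y, hy, hy0⟩
    by_cases ha : a = 0
    · have hyl : y ∈ l' := by
        rcases List.mem_append.mp hy with h | h
        · exact h
        · simp at h; omega
      obtain ⟨f, x, s, hdec, hx, hs⟩ := ih ⟨y, hyl, hy0⟩
      exact ⟨f, x, s ++ [0], by simp [hdec, ha], hx,
        fun y hy => by rcases List.mem_append.mp hy with h | h; exacts [hs y h, by simpa using h]⟩
    · exact ⟨l', a, [], by simp, ha, by simp⟩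

-- pvSucc on an explicit  f' ++ y :: x :: zeros  decomposition (sum = b case)
theorem pvSucc_decomp : ∀ (f' : List Int) (y x b : Int) (suffix : List Int),
    (∀ z ∈ f' ++ y :: x :: suffix, 0 ≤ z) → x ≠ 0 → (∀ z ∈ suffix, z = 0) →
    (f' ++ y :: x :: suffix).sum = b →
    pvSucc b (f' ++ y :: x :: suffix) = f' ++ (y + 1) :: 0 :: suffix := by
  intro f'
  induction f' with
  | nil =>
    intro y x b suffix hnn hx hz hsum
    have hs0 : suffix.sum = 0 := List.sum_eq_zero hz
    simp only [List.nil_append, List.sum_cons, hs0] at hsum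
    have hxe : x = b - y := by omega
    have hrep : suffix = List.replicate suffix.length 0 :=
      pv_zeros_of_sum_le (fun z hzz => hnn z (by simp [hzz])) (by omega)
    simp only [List.nil_append]
    rw [pvSucc, if_pos hxe, List.replicate_succ]
    rw [← hrep]
  | cons a f'' ih =>
    intro y x b suffix hnn hx hz hsum
    have hxpos : 0 < x := by
      have := hnn x (by simp)
      omega
    have hnn' : ∀ z ∈ f'' ++ y :: x :: suffix, 0 ≤ z := fun z hzz => hnn z (by simp [hzz])
    have hsum' : (f'' ++ y :: x :: suffix).sum = b - a := by
      simp [List.sum_append] at hsum ⊢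
      omega
    obtain ⟨q, r', hf⟩ : ∃ q r', f'' ++ y :: x :: suffix = q :: r' := by
      cases f'' <;> exact ⟨_, _, rfl⟩
    have hxr : x ∈ r' := by
      cases f'' with
      | nil =>
        simp only [List.nil_append, List.cons.injEq] at hf
        simp [← hf.2]
      | cons c f3 =>
        simp only [List.cons_append, List.cons.injEq] at hf
        rw [← hf.2]
        simp
    have hnnr : ∀ z ∈ q :: r', 0 ≤ z := by rw [← hf]; exact hnn'
    have hsumr : (q :: r').sum = b - a := by rw [← hf]; exact hsum'
    have hqne : q ≠ b - a := by
      intro e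
      have hxle : x ≤ r'.sum :=
        List.single_le_sum (fun z hzz => hnnr z (by simp [hzz])) x hxr
      simp only [List.sum_cons] at hsumr
      omega
    simp only [List.cons_append]
    rw [hf, pvSucc, if_neg hqne, ← hf, ih y x (b - a) suffix hnn' hx hz hsum']

theorem pvSucc_inc_last : ∀ (pat : List Int) (b : Int), pat ≠ [] → (∀ x ∈ pat, 0 ≤ x) →
    pat.sum < b →
    pvSucc b pat = pat.set (pat.length - 1) (pat.getD (pat.length - 1) 0 + 1) := by
  intro pat
  induction pat with
  | nil => intro b h; exact absurd rfl h
  | cons p rest ih =>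
    intro b _ hnn hsum
    cases rest with
    | nil => simp [pvSucc]
    | cons q r' =>
      have hq : q ≠ b - p := by
        have h1 : 0 ≤ r'.sum := pv_sum_nonneg (fun x hx => hnn x (by simp [hx]))
        simp only [List.sum_cons] at hsum
        omega
      rw [pvSucc, if_neg hq]
      rw [ih (b - p) (by simp) (fun x hx => hnn x (by simp [hx]))
        (by simp only [List.sum_cons] at hsum ⊢; omega)]
      simp only [List.length_cons]
      have h2 : r'.length + 1 + 1 - 1 = (r'.length + 1 - 1) + 1 := by omega
      rw [h2]
      simp
      rfl

theorem pvStep_eq_succ : ∀ (pat : List Int) (b : Int), pat ≠ [] → pvValid b pat →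
    pat.getD 0 0 < b →
    (let r := pvInnerA b pat ((pat.length : Int) - 1) pat.length;
     r.1.set r.2.toNat (r.1.getD r.2.toNat 0 + 1)) = pvSucc b pat := by
  intro pat b hne hv hlt
  obtain ⟨hnn, hsum⟩ := hv
  by_cases hs : pat.sum = b
  · -- sum = b : the inner loop strips trailing zeros and the last nonzero entry
    obtain ⟨p, rest, rfl⟩ : ∃ p rest, pat = p :: rest := by
      cases pat with
      | nil => exact absurd rfl hne
      | cons p rest => exact ⟨p, rest, rfl⟩
    simp only [List.getD_cons_zero] at hlt
    have hrs : rest.sum = b - p := by simp only [List.sum_cons] at hs; omega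
    have hex : ∃ y ∈ rest, y ≠ 0 := by
      by_contra hno
      push Not at hno
      have := List.sum_eq_zero hno
      omega
    obtain ⟨f, x, sfx, hdec, hx, hsfx⟩ := pv_decomp rest hex
    have hpat : p :: rest = (p :: f) ++ x :: sfx := by simp [hdec]
    rw [hpat] at hs ⊢
    have hlen : ((p :: f) ++ x :: sfx).length = (p :: f).length + 1 + sfx.length := by
      simp
      omega
    have hptr : (((p :: f) ++ x :: sfx).length : Int) - 1 = ((p :: f).length : Int) + sfx.length := by
      rw [hlen]; push_cast; ring
    rw [hptr]
    have hchar := pvInner_char (p :: f) x b sfx sfx.length ((p :: f) ++ x :: sfx).length hx hsfx hs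
      (le_refl _) (by rw [hlen]; simp; omega)
    rw [hchar]
    -- now the final increment: last element of (p :: f)
    obtain ⟨f', y, hfy⟩ : ∃ f' y, p :: f = f' ++ [y] := by
      rcases (p :: f).eq_nil_or_concat with h | ⟨f', y, h⟩
      · simp at h
      · exact ⟨f', y, by rw [h, List.concat_eq_append]⟩
    simp only [hfy]
    have htn : (((f' ++ [y]).length : Int) - 1).toNat = f'.length := by simp
    rw [htn]
    have hassoc : (f' ++ [y]) ++ (0 : Int) :: sfx = f' ++ y :: (0 :: sfx) := by simp
    rw [hassoc, pv_getD_append_len, pv_set_append_len]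
    have hassoc2 : (f' ++ [y]) ++ x :: sfx = f' ++ y :: x :: sfx := by simp
    have h' : f' ++ y :: x :: sfx = (p :: f) ++ x :: sfx := by rw [← hassoc2, ← hfy]
    have hs' : (f' ++ y :: x :: sfx).sum = b := by rw [h']; exact hs
    have hmem : ∀ z ∈ f' ++ y :: x :: sfx, 0 ≤ z := by
      intro z hzz
      apply hnn
      rw [hpat, ← h']
      exact hzz
    rw [hassoc2, pvSucc_decomp f' y x b sfx hmem hx hsfx hs']
  · -- sum < b : the inner loop does nothing, the last element is incremented
    have hslt : pat.sum < b := lt_of_le_of_ne hsum hs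
    obtain ⟨L, hL⟩ : ∃ L, pat.length = L + 1 := by
      cases pat with
      | nil => exact absurd rfl hne
      | cons a t => exact ⟨t.length, rfl⟩
    rw [hL, pvInnerA, if_neg hs]
    have htn : (((L + 1 : Nat) : Int) - 1).toNat = L := by push_cast; omega
    rw [pvSucc_inc_last pat b hne hnn hslt, hL]
    simp

theorem pvOuterA_eq_after : ∀ (fuel : Nat) (pat : List Int) (out : List (List Int)) (b : Int),
    pat ≠ [] → pvValid b pat → (pvAfter pat b).length ≤ fuel →
    pvOuterA b pat.length pat out fuel = out ++ pvAfter pat b := by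
  intro fuel
  induction fuel with
  | zero =>
    intro pat out b hne hv hlen
    have h0 : pvAfter pat b = [] := List.eq_nil_of_length_eq_zero (by omega)
    rw [pvOuterA, h0]
    simp
  | succ f ih =>
    intro pat out b hne hv hlen
    rw [pvOuterA]
    by_cases hc : pat.getD 0 0 < b
    · rw [if_pos hc]
      have hstep := pvStep_eq_succ pat b hne hv hc
      simp only at hstep
      simp only [hstep]
      have hsucc := pvSucc_after pat b hne hv hc
      have hval := pvSucc_valid pat b hne hv hc
      have hlen2 := pvSucc_length b pat
      have hne2 : pvSucc b pat ≠ [] := by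
        intro h
        rw [h] at hlen2
        cases pat with
        | nil => exact hne rfl
        | cons a t => simp at hlen2
      have hflen : (pvAfter (pvSucc b pat) b).length ≤ f := by
        rw [hsucc] at hlen
        simp at hlen
        omega
      rw [← hlen2, ih (pvSucc b pat) (out ++ [pvSucc b pat]) b hne2 hval hflen, hsucc]
      simp
    · rw [if_neg hc]
      obtain ⟨p, rest, rfl⟩ : ∃ p rest, pat = p :: rest := by
        cases pat with
        | nil => exact absurd rfl hne
        | cons p rest => exact ⟨p, rest, rfl⟩
      obtain ⟨hnn, hsum⟩ := hv
      have hrs : 0 ≤ rest.sum := pv_sum_nonneg (fun x hx => hnn x (by simp [hx]))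
      simp only [List.getD_cons_zero] at hc
      simp only [List.sum_cons] at hsum
      have hp : p = b := by omega
      have h0 : pvAfter (p :: rest) b = [] := by
        rw [hp]
        exact pvAfter_of_max b rest (fun x hx => hnn x (by simp [hx])) (by omega)
      rw [h0]
      simp

theorem pvGen_len_le : ∀ (k : Nat) (b c : Int), b ≤ c → (pvGen k b).length ≤ (c.toNat + 1) ^ k := by
  intro k
  induction k with
  | zero => intro b c h; simp [pvGen]
  | succ n ih =>
    intro b c h
    rw [pvGen, List.length_flatMap]
    simp only [List.length_map]
    have hbound : ∀ x ∈ (PySem.List.pyRange 0 (b + 1) 1).map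
        (fun v => (pvGen n (b - v)).length), x ≤ (c.toNat + 1) ^ n := by
      intro x hx
      simp only [List.mem_map] at hx
      obtain ⟨v, hv, rfl⟩ := hx
      have hv' := PySem.List.mem_pyRange_one.mp hv
      exact ih (b - v) c (by omega)
    have h1 := List.sum_le_card_nsmul _ _ hbound
    simp only [List.length_map, PySem.List.length_pyRange_one, smul_eq_mul] at h1
    have h2 : (b + 1 - 0).toNat ≤ c.toNat + 1 := by omega
    calc ((PySem.List.pyRange 0 (b + 1) 1).map
          (fun v => (pvGen n (b - v)).length)).sum
        ≤ (b + 1 - 0).toNat * (c.toNat + 1) ^ n := h1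
      _ ≤ (c.toNat + 1) * (c.toNat + 1) ^ n := Nat.mul_le_mul_right _ h2
      _ = (c.toNat + 1) ^ (n + 1) := (pow_succ' _ _).symm

theorem pv_flatMap_congr' (l : List Int) (f g : Int → List (List Int))
    (h : ∀ a ∈ l, f a = g a) : l.flatMap f = l.flatMap g := by
  rw [List.flatMap_def, List.flatMap_def, List.map_congr_left h]

theorem pvGen_ext : ∀ (k : Nat) (b : Int), 0 ≤ b →
    pvGen (k + 1) b = (pvGen k b).flatMap
      (fun p => (PySem.List.pyRange 0 ((b - p.sum) + 1) 1).map (fun v => p ++ [v])) := by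
  intro k
  induction k with
  | zero =>
    intro b hb
    rw [pvGen]
    simp only [pvGen]
    have hsing : ∀ (l : List Int), l.flatMap (fun v => ([[v]] : List (List Int)))
        = l.map (fun v => [v]) := by
      intro l
      induction l with
      | nil => rfl
      | cons a t iht => simp [iht]
    simp [hsing]
  | succ n ih =>
    intro b hb
    conv_lhs => rw [pvGen]
    conv_rhs => rw [pvGen]
    rw [List.flatMap_assoc]
    apply pv_flatMap_congr'
    intro v hv
    have hv' := PySem.List.mem_pyRange_one.mp hv
    rw [ih (b - v) (by omega)]
    simp [List.map_flatMap, List.flatMap_map, List.map_map, Function.comp_def, sub_sub,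
      List.cons_append]

theorem pvLayers : ∀ (n : Nat) (b : Int), 0 ≤ b →
    (List.range n).foldl
      (fun lyr _ => lyr.flatMap
        (fun node => (PySem.List.pyRange 0 (node.2 + 1) 1).map (fun v => (v :: node.1, node.2 - v))))
      [(([] : List Int), b)]
      = (pvGen n b).map (fun p => (p.reverse, b - p.sum)) := by
  intro n
  induction n with
  | zero => intro b hb; simp [pvGen]
  | succ m ih =>
    intro b hb
    rw [List.range_succ, List.foldl_append, ih b hb, List.foldl_cons, List.foldl_nil]
    rw [pvGen_ext m b hb]
    simp [List.flatMap_map, List.map_flatMap, List.map_map, Function.comp_def,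
      List.sum_append, sub_sub, List.reverse_append]

theorem pvAlt_eq_gen : ∀ (dimension max_number : Int),
    pattern_finder_alt dimension max_number = pvGen dimension.toNat (max max_number 0) := by
  intro d M
  show ((List.range d.toNat).foldl
      (fun lyr _ => lyr.flatMap
        (fun node => (PySem.List.pyRange 0 (node.2 + 1) 1).map (fun v => (v :: node.1, node.2 - v))))
      [(([] : List Int), max M 0)]).map (fun node => node.1.reverse) = pvGen d.toNat (max M 0)
  rw [pvLayers d.toNat (max M 0) (le_max_right _ _), List.map_map]
  simp [Function.comp_def]

-- ===== VERDICT (by name: the statement is the Claim_ definition above) =====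
theorem pattern_finder_spec : Claim_equal_pattern_finder := by
  intro d M hdom hpre
  unfold Pre_pattern_finder at hpre
  unfold Spec_pattern_finder
  rw [pvAlt_eq_gen]
  show pvOuterA M d.toNat (List.replicate d.toNat 0) [List.replicate d.toNat 0]
    ((M.toNat + 1) ^ d.toNat) = pvGen d.toNat (max M 0)
  have hk1 : 1 ≤ d.toNat := by omega
  by_cases hM : M ≤ 0
  · have hMt : M.toNat = 0 := by omega
    have hmax : max M 0 = 0 := by omega
    have hfuel : (M.toNat + 1) ^ d.toNat = 0 + 1 := by rw [hMt]; simp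
    rw [hmax, hfuel]
    have hz : (List.replicate d.toNat (0 : Int)).getD 0 0 = 0 := by
      cases h : d.toNat with
      | zero => simp
      | succ m => simp [List.replicate_succ]
    rw [pvOuterA, if_neg (by rw [hz]; omega)]
    rw [pvGen_cons_zero d.toNat 0 le_rfl, pvAfter_zeros_zero]
  · have hmax : max M 0 = M := by omega
    rw [hmax]
    have hvz : pvValid M (List.replicate d.toNat 0) :=
      ⟨fun x hx => by rw [List.eq_of_mem_replicate hx],
       by simp [List.sum_replicate]; omega⟩
    have hnez : (List.replicate d.toNat (0 : Int)) ≠ [] := by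
      intro h
      have := congrArg List.length h
      simp at this
      omega
    have hflen : (pvAfter (List.replicate d.toNat 0) M).length ≤ (M.toNat + 1) ^ d.toNat := by
      have h1 := pvGen_len_le d.toNat M M le_rfl
      rw [pvGen_cons_zero d.toNat M (by omega)] at h1
      simp at h1
      omega
    have h2 := pvOuterA_eq_after ((M.toNat + 1) ^ d.toNat) (List.replicate d.toNat 0)
      [List.replicate d.toNat 0] M hnez hvz hflen
    rw [List.length_replicate] at h2
    rw [h2, pvGen_cons_zero d.toNat M (by omega)]
    simp
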